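-- pv_equiv track=rewrite | github.com/MrBrantCode/unitest_baseline | mut_generate/mist_train_taco/taco_19158/solution.py | count_good_pairings
-- ===== SOURCE A (Python) =====
-- def count_good_pairings(n: int) -> int:
--     mod = 998244353
--
--     # Initialize the list l with 1s
--     l = [1] * (n + 1)
--
--     # Fill the list l with the number of divisors for each number up to n
--     for i in range(1, n + 1):
--         for j in range(i * 2, n + 1, i):
--             l[j] += 1
--
--     # Initialize the dp array and the sum s
--     dp = [1]
--     s = 1
--
--     # Fill the dp array with the number of good pairings up to each number
--     for i in range(1, n + 1):
--         a = s
--         a += l[i] - 1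
--         dp.append(a % mod)
--         s += dp[i]
--
--     # Return the last element of dp, which is the number of good pairings for n
--     return dp[-1]
-- ===== SOURCE B (Python) =====
-- def count_good_pairings(n: int) -> int:
--     mod = 998244353
--     if n < 1:
--         return 1
--     # closed form: the answer is a power of two plus a sum over each pair of a divisor
--     # with one of its proper multiples (at most n), weighted by a power of two
--     pow2 = [1]
--     for _ in range(1, n):
--         pow2.append(pow2[-1] * 2 % mod)
--     ans = pow2[n - 1]
--     for d in range(1, n // 2 + 1):
--         for m in range(2 * d, n + 1, d):
--             ans += pow2[n - 1 - m] if m < n else 1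
--     return ans % mod
-- ===== Notes on version B (the rewrite author's own statement) =====
-- stated objective: alternative
-- what changed: B replaces A's divisor-count sieve plus sequential DP recurrence by an unrolled closed form: the answer is a power of two plus a sum over pairs of a divisor with one of its proper multiples, each pair weighted by a power of two read from a precomputed table, computed by a direct pair-enumerating double loop with no divisor-count table and no DP state.
import Mathlib
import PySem

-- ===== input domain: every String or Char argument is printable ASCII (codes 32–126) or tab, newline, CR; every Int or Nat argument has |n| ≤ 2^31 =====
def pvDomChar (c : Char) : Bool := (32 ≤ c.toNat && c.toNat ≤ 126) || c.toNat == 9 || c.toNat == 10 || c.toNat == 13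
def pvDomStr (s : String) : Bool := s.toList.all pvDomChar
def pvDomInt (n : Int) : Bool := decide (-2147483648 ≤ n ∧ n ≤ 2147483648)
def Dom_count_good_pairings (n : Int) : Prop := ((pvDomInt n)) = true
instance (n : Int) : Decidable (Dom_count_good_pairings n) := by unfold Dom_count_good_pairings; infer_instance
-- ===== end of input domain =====

-- B replaces A's divisor-count sieve followed by the sequential DP over dp[1..n] by an
-- unrolled closed form: the answer is a power of two plus a sum over each pair of a
-- divisor d with one of its proper multiples m at most n, weighted by a power of two
-- read from a precomputed table; a direct pair-enumerating double loop computes it with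
-- no divisor-count table and no DP state (objective: alternative).

-- ===== PORT A =====
-- Python lists are mutable arrays, so A's lists 'l' and 'dp' are ported as Array with
-- in-place update (set!) and append (push), step for step; every index used (j, i in
-- [1, n]) is provably in range, where set!/getD are exact for Python's l[j] = ... / l[j].
def count_good_pairings (n : Int) : Int :=
  let m : Int := 998244353
  let l : Array Int := Array.replicate (n + 1).toNat 1
  let l : Array Int :=
    (PySem.List.pyRange 1 (n + 1) 1).foldl (fun l i =>
      (PySem.List.pyRange (i * 2) (n + 1) i).foldl (fun (l : Array Int) j =>
        l.set! j.toNat (l.getD j.toNat 0 + 1)) l) l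
  let st : Array Int × Int :=
    (PySem.List.pyRange 1 (n + 1) 1).foldl (fun (st : Array Int × Int) i =>
      let a := st.2 + (l.getD i.toNat 0 - 1)
      let dp := st.1.push (PySem.Int.mod a m)
      (dp, st.2 + dp.getD i.toNat 0)) (#[1], 1)
  PySem.List.pyGetD st.1.toList (-1) 0

-- ===== PORT B =====
-- B's Python list 'pow2' is a mutable list (append + reads), so it is ported as Array
-- with push (exact for Python's append); pow2[-1] reads the last element of the always
-- nonempty table (pw.getD (pw.size - 1)), pow2[n-1-m] / pow2[n-1] are reads at indices
-- provably in [0, n), n // 2 is PySem.Int.floordiv n 2, and the conditional expression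
-- stays an if-then-else.
def count_good_pairings_alt (n : Int) : Int :=
  let md : Int := 998244353
  if n < 1 then 1
  else
    let pow2 : Array Int :=
      (PySem.List.pyRange 1 n 1).foldl (fun pw _ =>
        pw.push (PySem.Int.mod (pw.getD (pw.size - 1) 0 * 2) md)) #[1]
    let ans : Int := pow2.getD (n - 1).toNat 0
    let ans : Int :=
      (PySem.List.pyRange 1 (PySem.Int.floordiv n 2 + 1) 1).foldl (fun ans d =>
        (PySem.List.pyRange (2 * d) (n + 1) d).foldl (fun ans m =>
          ans + (if m < n then pow2.getD (n - 1 - m).toNat 0 else 1)) ans) ans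
    PySem.Int.mod ans md

-- ===== PRECONDITION & SPEC =====
def Spec_count_good_pairings (n : Int) (out : Int) : Prop := out = count_good_pairings_alt n
instance (n : Int) (out : Int) : Decidable (Spec_count_good_pairings n out) := by unfold Spec_count_good_pairings; infer_instance

-- ===== CLAIM (what is proved, stated in full; the proofs are below) =====
def Claim_equal_count_good_pairings : Prop := ∀ (n : Int), Dom_count_good_pairings n → Spec_count_good_pairings n (count_good_pairings n)

-- ===== LEMMAS AND PROOFS =====

-- the common value both programs are about at slot i: the number of divisors of i among 1..n
def pvD (n i : Int) : Int :=
  (((PySem.List.pyRange 1 (n + 1) 1).countP (fun d => decide (d ∣ i ∧ d ≤ i ∧ i ≤ n))) : Int)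

-- 2^e reduced mod 998244353 (the entries of B's pow2 table)
def pvPw (e : Nat) : Int := (2 : Int) ^ e % 998244353

-- the exact (unreduced) running sum of A's DP after processing 1..i
def pvS (n i : Int) : Int :=
  2 ^ i.toNat + ((PySem.List.pyRange 1 (i + 1) 1).map
    (fun m => 2 ^ (i - m).toNat * (pvD n m - 1))).sum

-- pyGetD after pySetD at Int indices inside the list
theorem pv_getD_setD (L : List Int) (j k v : Int) (hj0 : 0 ≤ j) (hj : j < (L.length : Int))
    (hk0 : 0 ≤ k) (hk : k < (L.length : Int)) :
    PySem.List.pyGetD (PySem.List.pySetD L j v) k 0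
      = if k = j then v else PySem.List.pyGetD L k 0 := by
  rw [PySem.List.pySetD_of_nonneg L v hj0]
  rw [PySem.List.pyGetD_eq_getElem _ _ hk0 (by simpa using hk)]
  rw [List.getElem_set]
  by_cases h : k = j
  · subst h; simp
  · have hne : ¬ (j.toNat = k.toNat) := by omega
    rw [if_neg hne, if_neg h, PySem.List.pyGetD_eq_getElem _ _ hk0 hk]

-- the increment loop preserves the length
theorem pv_bump_length (js : List Int) : ∀ (L : List Int),
    (js.foldl (fun l j => PySem.List.pySetD l j (PySem.List.pyGetD l j 0 + 1)) L).length
      = L.length := by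
  induction js with
  | nil => intro L; rfl
  | cons j js ih =>
      intro L
      simp only [List.foldl_cons]
      rw [ih, PySem.List.length_pySetD]

-- 'for j in js: l[j] += 1' adds the multiplicity of k to slot k
theorem pv_bump_getD (js : List Int) : ∀ (L : List Int) (k : Int),
    (∀ j ∈ js, 0 ≤ j ∧ j < (L.length : Int)) → 0 ≤ k → k < (L.length : Int) →
    PySem.List.pyGetD
        (js.foldl (fun l j => PySem.List.pySetD l j (PySem.List.pyGetD l j 0 + 1)) L) k 0
      = PySem.List.pyGetD L k 0 + (js.count k : Int) := by
  induction js with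
  | nil => intro L k _ _ _; simp
  | cons j js ih =>
      intro L k hb hk0 hk
      obtain ⟨hj0, hj⟩ := hb j (by simp)
      simp only [List.foldl_cons]
      rw [ih _ k (fun x hx => by
            have := hb x (by simp [hx])
            simpa [PySem.List.length_pySetD] using this)
          hk0 (by simpa [PySem.List.length_pySetD] using hk)]
      rw [pv_getD_setD L j k _ hj0 hj hk0 hk]
      by_cases h : k = j
      · subst h; simp; omega
      · simp [List.count_cons, h]
        intro hkj; exact absurd hkj.symm h

-- a positive-step range has no duplicates
theorem pv_nodup_pyRange_pos (a b s : Int) (hs : 0 < s) : (PySem.List.pyRange a b s).Nodup := by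
  rw [PySem.List.pyRange_of_pos a b hs]
  refine List.Nodup.map ?_ (List.nodup_range)
  intro k1 k2 h
  have h2 : s * (k1 : Int) = s * (k2 : Int) := by linarith
  have h3 : (k1 : Int) = (k2 : Int) := mul_left_cancel₀ (by omega) h2
  exact_mod_cast h3

-- the count of j in range(a, n+1, i), for i dividing a, is the indicator of
-- 'i divides j and a ≤ j ≤ n'
theorem pv_count_pyRange_mult (i a j n : Int) (hi : 1 ≤ i) (ha : i ∣ a) (ha0 : 1 ≤ a) :
    ((PySem.List.pyRange a (n + 1) i).count j : Int)
      = if i ∣ j ∧ a ≤ j ∧ j ≤ n then 1 else 0 := by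
  have hnd := pv_nodup_pyRange_pos a (n + 1) i (by omega)
  by_cases hmem : j ∈ PySem.List.pyRange a (n + 1) i
  · rw [PySem.List.mem_pyRange_iff_of_pos (by omega)] at hmem
    obtain ⟨h1, h2, h3⟩ := hmem
    have hdvd : i ∣ j := by
      have hj : j = (j - a) + a := by ring
      rw [hj]
      exact dvd_add h3 ha
    rw [if_pos ⟨hdvd, h1, by omega⟩]
    have hc : List.count j (PySem.List.pyRange a (n + 1) i) = 1 := by
      refine List.count_eq_one_of_mem hnd ?_
      rw [PySem.List.mem_pyRange_iff_of_pos (by omega)]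
      exact ⟨h1, h2, h3⟩
    rw [hc]; rfl
  · have hcnt : List.count j (PySem.List.pyRange a (n + 1) i) = 0 :=
      List.count_eq_zero.mpr hmem
    rw [hcnt]
    by_cases hcond : i ∣ j ∧ a ≤ j ∧ j ≤ n
    · exfalso
      apply hmem
      rw [PySem.List.mem_pyRange_iff_of_pos (by omega)]
      refine ⟨hcond.2.1, by omega, ?_⟩
      exact dvd_sub hcond.1 ha
    · rw [if_neg hcond]; rfl

-- countP splits over a disjoint cover of the predicate (pointwise on the list)
theorem pv_countP_split (l : List Int) (p q r : Int → Bool)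
    (h : ∀ x ∈ l, (r x = true ↔ p x = true ∨ q x = true) ∧ ¬(p x = true ∧ q x = true)) :
    l.countP r = l.countP p + l.countP q := by
  induction l with
  | nil => simp
  | cons a l ih =>
      have ha := h a (by simp)
      have ih' := ih (fun x hx => h x (by simp [hx]))
      simp only [List.countP_cons]
      by_cases hp : p a = true <;> by_cases hq : q a = true <;>
        by_cases hr : r a = true <;> simp_all <;> omega

-- sum of a 0/1 indicator over a list is a countP
theorem pv_sum_indicator (l : List Int) (p : Int → Prop) [DecidablePred p] :
    (l.map (fun x => if p x then (1:Int) else 0)).sum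
      = ((l.countP (fun x => decide (p x))) : Int) := by
  induction l with
  | nil => simp
  | cons a l ih =>
      simp only [List.map_cons, List.sum_cons, List.countP_cons, ih]
      by_cases h : p a <;> simp [h] <;> push_cast <;> ring

-- 1 + (# proper divisors of j among 1..n) = # divisors of j among 1..n  (for 1 ≤ j ≤ n)
theorem pv_cover (n j : Int) (h1 : 1 ≤ j) (h2 : j ≤ n) :
    1 + (((PySem.List.pyRange 1 (n + 1) 1).countP
          (fun d => decide (d ∣ j ∧ d * 2 ≤ j ∧ j ≤ n))) : Int)
      = pvD n j := by
  unfold pvD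
  have hmain : (PySem.List.pyRange 1 (n + 1)).countP (fun d => decide (d ∣ j ∧ d ≤ j ∧ j ≤ n))
      = (PySem.List.pyRange 1 (n + 1)).countP (fun d => decide (d ∣ j ∧ d * 2 ≤ j ∧ j ≤ n))
        + (PySem.List.pyRange 1 (n + 1)).countP (fun d => d == j) := by
    apply pv_countP_split
    intro x hx
    rw [PySem.List.mem_pyRange_one] at hx
    constructor
    · constructor
      · intro hr
        simp only [decide_eq_true_eq] at hr
        obtain ⟨hdvd, hxj, _⟩ := hr
        by_cases heq : x = j
        · right; simp [heq]
        · left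
          simp only [decide_eq_true_eq]
          refine ⟨hdvd, ?_, h2⟩
          obtain ⟨c, hc⟩ := hdvd
          have hcpos : 0 < c := by
            by_contra h0
            push_neg at h0
            have : x * c ≤ 0 := mul_nonpos_of_nonneg_of_nonpos (by omega) h0
            omega
          have hc2 : 2 ≤ c := by
            rcases lt_or_ge c 2 with h' | h'
            · exfalso
              have hc1 : c = 1 := by omega
              rw [hc1, mul_one] at hc
              omega
            · exact h'
          have : x * 2 ≤ x * c := mul_le_mul_of_nonneg_left hc2 (by omega)
          omega
      · intro hr
        simp only [decide_eq_true_eq]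
        rcases hr with hr | hr
        · simp only [decide_eq_true_eq] at hr
          exact ⟨hr.1, by omega, h2⟩
        · have heq : x = j := by simpa using hr
          exact ⟨by rw [heq], by omega, h2⟩
    · rintro ⟨hp, hq⟩
      simp only [decide_eq_true_eq] at hp
      have heq : x = j := by simpa using hq
      omega
  have hone : (PySem.List.pyRange 1 (n + 1)).countP (fun d => d == j) = 1 := by
    have hc : (PySem.List.pyRange 1 (n + 1)).countP (fun d => d == j)
        = (PySem.List.pyRange 1 (n + 1)).count j := rfl
    rw [hc]
    exact List.count_eq_one_of_mem (PySem.List.nodup_pyRange_one 1 (n + 1))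
      (by rw [PySem.List.mem_pyRange_one]; omega)
  rw [hmain, hone]
  push_cast
  ring

-- Array.getD at a nonnegative in-range Int index is Python's l[i]
theorem pv_arrGetD (a : Array Int) (i : Int) (h0 : 0 ≤ i) (h : i < (a.size : Int)) :
    a.getD i.toNat 0 = PySem.List.pyGetD a.toList i 0 := by
  have hlt : i.toNat < a.size := by omega
  rw [PySem.List.pyGetD_eq_getElem _ _ h0 (by rw [Array.length_toList]; omega)]
  rw [Array.getElem_toList hlt]
  simp [Array.getD_eq_getD_getElem?, Array.getElem?_eq_getElem hlt]

-- Array.set! at a nonnegative in-range Int index is Python's l[i] = v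
theorem pv_arrSet (a : Array Int) (i : Int) (v : Int) (h0 : 0 ≤ i) :
    (a.set! i.toNat v).toList = PySem.List.pySetD a.toList i v := by
  rw [PySem.List.pySetD_of_nonneg _ _ h0]
  exact Array.toList_setIfInBounds

-- the Array increment loop computes (via toList) the List increment loop
theorem pv_arr_bump (js : List Int) : ∀ (L : Array Int),
    (∀ j ∈ js, 0 ≤ j ∧ j < (L.size : Int)) →
    (js.foldl (fun (l : Array Int) j => l.set! j.toNat (l.getD j.toNat 0 + 1)) L).toList
      = js.foldl (fun l j => PySem.List.pySetD l j (PySem.List.pyGetD l j 0 + 1)) L.toList := by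
  induction js with
  | nil => intro L _; rfl
  | cons j js ih =>
      intro L hb
      obtain ⟨hj0, hj⟩ := hb j (by simp)
      simp only [List.foldl_cons]
      have hstep : (L.set! j.toNat (L.getD j.toNat 0 + 1)).toList
          = PySem.List.pySetD L.toList j (PySem.List.pyGetD L.toList j 0 + 1) := by
        rw [pv_arrGetD L j hj0 hj, pv_arrSet L j _ hj0]
      have hsz : ((L.set! j.toNat (L.getD j.toNat 0 + 1)).size : Int) = (L.size : Int) := by
        have := congrArg List.length hstep
        rw [← Array.length_toList, this, PySem.List.length_pySetD, Array.length_toList]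
      rw [ih _ (fun x hx => by
            obtain ⟨h1, h2⟩ := hb x (by simp [hx])
            exact ⟨h1, by rw [hsz]; exact h2⟩), hstep]

-- ---- A's sieve (inner range starts at i*2) ----

theorem pv_sieve_length (n : Int) (is : List Int) : ∀ (L : List Int),
    (is.foldl (fun l i =>
      (PySem.List.pyRange (i * 2) (n + 1) i).foldl (fun l j =>
        PySem.List.pySetD l j (PySem.List.pyGetD l j 0 + 1)) l) L).length = L.length := by
  induction is with
  | nil => intro L; rfl
  | cons i is ih => intro L; simp only [List.foldl_cons]; rw [ih, pv_bump_length]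

theorem pv_sieve_getD (n : Int) (is : List Int) : ∀ (L : List Int) (k : Int),
    (∀ i ∈ is, 1 ≤ i) → (n + 1 ≤ (L.length : Int)) → 0 ≤ k → k < (L.length : Int) →
    PySem.List.pyGetD
        (is.foldl (fun l i =>
          (PySem.List.pyRange (i * 2) (n + 1) i).foldl (fun l j =>
            PySem.List.pySetD l j (PySem.List.pyGetD l j 0 + 1)) l) L) k 0
      = PySem.List.pyGetD L k 0
        + ((is.map (fun i => ((PySem.List.pyRange (i * 2) (n + 1) i).count k : Int))).sum) := by
  induction is with
  | nil => intro L k _ _ _ _; simp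
  | cons i is ih =>
      intro L k his hlen hk0 hk
      have hi1 : (1:Int) ≤ i := his i (by simp)
      have hbounds : ∀ j ∈ PySem.List.pyRange (i * 2) (n + 1) i, 0 ≤ j ∧ j < (L.length : Int) := by
        intro j hj
        rw [PySem.List.mem_pyRange_iff_of_pos (by omega)] at hj
        exact ⟨by omega, by omega⟩
      simp only [List.foldl_cons]
      rw [ih _ k (fun x hx => his x (by simp [hx]))
          (by rw [pv_bump_length]; exact hlen) hk0
          (by rw [pv_bump_length]; exact hk)]
      rw [pv_bump_getD _ L k hbounds hk0 hk]
      simp [List.sum_cons]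
      ring

theorem pv_arr_sieve (n : Int) (is : List Int) : ∀ (L : Array Int),
    (∀ i ∈ is, 1 ≤ i) → (n + 1 ≤ (L.size : Int)) →
    (is.foldl (fun l i =>
      (PySem.List.pyRange (i * 2) (n + 1) i).foldl (fun (l : Array Int) j =>
        l.set! j.toNat (l.getD j.toNat 0 + 1)) l) L).toList
      = is.foldl (fun l i =>
          (PySem.List.pyRange (i * 2) (n + 1) i).foldl (fun l j =>
            PySem.List.pySetD l j (PySem.List.pyGetD l j 0 + 1)) l) L.toList := by
  induction is with
  | nil => intro L _ _; rfl
  | cons i is ih =>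
      intro L his hlen
      have hi1 : (1:Int) ≤ i := his i (by simp)
      have hb : ∀ j ∈ PySem.List.pyRange (i * 2) (n + 1) i, 0 ≤ j ∧ j < (L.size : Int) := by
        intro j hj
        rw [PySem.List.mem_pyRange_iff_of_pos (by omega)] at hj
        exact ⟨by omega, by omega⟩
      simp only [List.foldl_cons]
      have hstep := pv_arr_bump (PySem.List.pyRange (i * 2) (n + 1) i) L hb
      have hsz : (((PySem.List.pyRange (i * 2) (n + 1) i).foldl
            (fun (l : Array Int) j => l.set! j.toNat (l.getD j.toNat 0 + 1)) L).size : Int)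
          = (L.size : Int) := by
        have := congrArg List.length hstep
        rw [← Array.length_toList, this, pv_bump_length, Array.length_toList]
      rw [ih _ (fun x hx => his x (by simp [hx])) (by rw [hsz]; exact hlen), hstep]

-- reducing the accumulator mod M before adding does not change the result mod M
theorem pv_mod_absorb (s c : Int) :
    PySem.Int.mod (PySem.Int.mod s 998244353 + c) 998244353
      = PySem.Int.mod (s + c) 998244353 := by
  rw [PySem.Int.mod_eq_emod_of_pos (by norm_num), PySem.Int.mod_eq_emod_of_pos (by norm_num),
      PySem.Int.mod_eq_emod_of_pos (by norm_num)]
  conv_rhs => rw [Int.add_emod]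
  conv_lhs => rw [Int.add_emod, Int.emod_emod_of_dvd _ dvd_rfl]

-- A's list DP loop over range(a, n+1) ends with the same answer as the reduced scalar loop
theorem pv_dp_loop (n : Int) (l : List Int)
    (hl : ∀ i : Int, 1 ≤ i → i ≤ n → PySem.List.pyGetD l i 0 = pvD n i) :
    ∀ (k : Nat) (a : Int) (dp : List Int) (s dB sB : Int)
      (h1 : 1 ≤ a) (hk : a + k = n + 1) (hne : dp ≠ []) (hlen : (dp.length : Int) = a)
      (hlast : dp.getLast hne = dB) (hs : PySem.Int.mod s 998244353 = sB),
    PySem.List.pyGetD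
        ((PySem.List.pyRange a (n + 1) 1).foldl (fun (st : List Int × Int) i =>
          let x := st.2 + (PySem.List.pyGetD l i 0 - 1)
          let dp := st.1 ++ [PySem.Int.mod x 998244353]
          (dp, st.2 + PySem.List.pyGetD dp i 0)) (dp, s)).1 (-1) 0
      = ((PySem.List.pyRange a (n + 1) 1).foldl (fun (st : Int × Int) i =>
          let dp := PySem.Int.mod (st.2 + pvD n i - 1) 998244353
          (dp, PySem.Int.mod (st.2 + dp) 998244353)) (dB, sB)).1 := by
  intro k
  induction k with
  | zero =>
      intro a dp s dB sB h1 hk hne hlen hlast hs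
      rw [PySem.List.pyRange_one_eq_nil (by omega)]
      simp only [List.foldl_nil]
      rw [PySem.List.pyGetD_neg_one _ _ hne]
      exact hlast
  | succ k ih =>
      intro a dp s dB sB h1 hk hne hlen hlast hs
      rw [PySem.List.pyRange_one_cons (by omega)]
      simp only [List.foldl_cons]
      set x : Int := PySem.Int.mod (s + (PySem.List.pyGetD l a 0 - 1)) 998244353 with hx
      have hgetnew : PySem.List.pyGetD (dp ++ [x]) a 0 = x := by
        rw [PySem.List.pyGetD_eq_getElem _ _ (by omega)
            (by simp only [List.length_append, List.length_cons, List.length_nil]; push_cast; omega)]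
        rw [List.getElem_append_right (by omega)]
        simp [show a.toNat - dp.length = 0 by omega]
      have hdivs : PySem.List.pyGetD l a 0 = pvD n a := hl a h1 (by omega)
      have hdB : PySem.Int.mod (sB + pvD n a - 1) 998244353 = x := by
        rw [← hs, hx, ← hdivs]
        rw [show PySem.Int.mod s 998244353 + PySem.List.pyGetD l a 0 - 1
            = PySem.Int.mod s 998244353 + (PySem.List.pyGetD l a 0 - 1) by ring]
        exact pv_mod_absorb s _
      have hsB : PySem.Int.mod (sB + x) 998244353 = PySem.Int.mod (s + x) 998244353 := by
        rw [← hs]; exact pv_mod_absorb s x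
      have := ih (a + 1) (dp ++ [x]) (s + x) x (PySem.Int.mod (s + x) 998244353)
        (by omega) (by omega) (by simp)
        (by simp only [List.length_append, List.length_cons, List.length_nil]; push_cast; omega)
        (by rw [List.getLast_append_singleton]) rfl
      simp only [hgetnew] at this ⊢
      rw [this]
      congr 1
      simp only [hdB, hsB]

-- the Array DP loop computes (via toList) the List DP loop
theorem pv_arr_dp (n : Int) (l : Array Int) (hln : n + 1 ≤ (l.size : Int)) :
    ∀ (k : Nat) (a : Int) (dp : Array Int) (s : Int),
    1 ≤ a → a + k = n + 1 → (dp.size : Int) = a →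
    ((PySem.List.pyRange a (n + 1) 1).foldl (fun (st : Array Int × Int) i =>
        let x := st.2 + (l.getD i.toNat 0 - 1)
        let d := st.1.push (PySem.Int.mod x 998244353)
        (d, st.2 + d.getD i.toNat 0)) (dp, s)).1.toList
      = ((PySem.List.pyRange a (n + 1) 1).foldl (fun (st : List Int × Int) i =>
          let x := st.2 + (PySem.List.pyGetD l.toList i 0 - 1)
          let d := st.1 ++ [PySem.Int.mod x 998244353]
          (d, st.2 + PySem.List.pyGetD d i 0)) (dp.toList, s)).1 := by
  intro k
  induction k with
  | zero =>
      intro a dp s h1 hk hsz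
      rw [PySem.List.pyRange_one_eq_nil (by omega)]
      simp only [List.foldl_nil]
  | succ k ih =>
      intro a dp s h1 hk hsz
      rw [PySem.List.pyRange_one_cons (by omega)]
      simp only [List.foldl_cons]
      have hli : l.getD a.toNat 0 = PySem.List.pyGetD l.toList a 0 :=
        pv_arrGetD l a (by omega) (by omega)
      refine Eq.trans (ih (a + 1)
        (dp.push (PySem.Int.mod (s + (l.getD a.toNat 0 - 1)) 998244353))
        (s + (dp.push (PySem.Int.mod (s + (l.getD a.toNat 0 - 1)) 998244353)).getD a.toNat 0)
        (by omega) (by omega) (by rw [Array.size_push]; push_cast; omega)) ?_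
      have ht : (dp.push (PySem.Int.mod (s + (l.getD a.toNat 0 - 1)) 998244353)).toList
          = dp.toList ++ [PySem.Int.mod (s + (PySem.List.pyGetD l.toList a 0 - 1)) 998244353] := by
        rw [Array.toList_push, hli]
      have hpair : ((dp.push (PySem.Int.mod (s + (l.getD a.toNat 0 - 1)) 998244353)).toList,
            s + (dp.push (PySem.Int.mod (s + (l.getD a.toNat 0 - 1)) 998244353)).getD a.toNat 0)
          = (dp.toList ++ [PySem.Int.mod (s + (PySem.List.pyGetD l.toList a 0 - 1)) 998244353],
            s + PySem.List.pyGetD (dp.toList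
              ++ [PySem.Int.mod (s + (PySem.List.pyGetD l.toList a 0 - 1)) 998244353]) a 0) := by
        rw [Prod.mk.injEq]
        refine ⟨ht, ?_⟩
        rw [pv_arrGetD _ a (by omega) (by rw [Array.size_push]; push_cast; omega), ht]
      rw [hpair]

-- ---- B-side: the pow2 table ----

-- the append loop extends the power table: from 2^0..2^(k-1) it builds 2^0..2^(k+|t|-1)
theorem pv_pow2_build (t : List Int) : ∀ (k : Nat), 1 ≤ k →
    t.foldl (fun l _ =>
        l ++ [PySem.Int.mod (PySem.List.pyGetD l (-1) 0 * 2) 998244353])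
      ((List.range k).map pvPw)
      = (List.range (k + t.length)).map pvPw := by
  induction t with
  | nil => intro k _; simp
  | cons x t ih =>
      intro k hk
      simp only [List.foldl_cons]
      have hne : (List.range k).map pvPw ≠ [] := by
        simp only [ne_eq, List.map_eq_nil_iff, List.range_eq_nil]
        omega
      have hlast : PySem.List.pyGetD ((List.range k).map pvPw) (-1) 0 = pvPw (k - 1) := by
        rw [PySem.List.pyGetD_neg_one _ _ hne, List.getLast_eq_getElem]
        simp only [List.getElem_map, List.length_map, List.length_range, List.getElem_range]
      have hstep : PySem.Int.mod (pvPw (k - 1) * 2) 998244353 = pvPw k := by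
        rw [PySem.Int.mod_eq_emod_of_pos (by norm_num)]
        unfold pvPw
        rw [Int.mul_emod, Int.emod_emod_of_dvd _ dvd_rfl, ← Int.mul_emod]
        congr 1
        rw [← pow_succ]
        congr 1
        omega
      have happ : ((List.range k).map pvPw)
          ++ [PySem.Int.mod (PySem.List.pyGetD ((List.range k).map pvPw) (-1) 0 * 2) 998244353]
          = (List.range (k + 1)).map pvPw := by
        rw [hlast, hstep, List.range_succ, List.map_append, List.map_singleton]
      have hlen : k + 1 + t.length = k + (x :: t).length := by
        simp only [List.length_cons]; omega
      rw [happ, ih (k + 1) (by omega), hlen]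

-- ---- B-side: list-sum combinatorics ----

-- summing 'f at a, else 0' over a duplicate-free list containing a gives f a
theorem pv_sum_single (M : List Int) (f : Int → Int) (a : Int) :
    M.Nodup → a ∈ M → (M.map (fun m => if m = a then f m else 0)).sum = f a := by
  induction M with
  | nil => intro _ h; simp at h
  | cons b M ih =>
      intro hnd hmem
      simp only [List.map_cons, List.sum_cons]
      by_cases hba : b = a
      · subst hba
        rw [if_pos rfl]
        have hbnotM : b ∉ M := (List.nodup_cons.mp hnd).1
        have hzero : (M.map (fun m => if m = b then f m else 0)).sum = 0 := by
          have hz : ∀ m ∈ M, (if m = b then f m else 0) = 0 := by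
            intro m hm
            rw [if_neg]
            intro h
            exact hbnotM (h ▸ hm)
          rw [List.map_congr_left hz]
          simp
        rw [hzero]; ring
      · rw [if_neg hba]
        have hM : a ∈ M := by
          rcases List.mem_cons.mp hmem with h | h
          · exact absurd h.symm hba
          · exact h
        rw [ih (List.nodup_cons.mp hnd).2 hM]; ring

-- a sum over a sublist L of a duplicate-free list M is the count-weighted sum over M
theorem pv_sum_count (L : List Int) : ∀ (M : List Int) (f : Int → Int),
    M.Nodup → (∀ x ∈ L, x ∈ M) →
    (L.map f).sum = (M.map (fun m => f m * (L.count m : Int))).sum := by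
  induction L with
  | nil =>
      intro M f _ _
      simp [List.map_congr_left (fun m _ => by simp : ∀ m ∈ M, f m * ((List.count m []:Nat) : Int) = 0)]
  | cons a L ih =>
      intro M f hnd hsub
      simp only [List.map_cons, List.sum_cons]
      rw [ih M f hnd (fun x hx => hsub x (by simp [hx]))]
      have hsplit : ∀ m ∈ M, f m * (((a :: L).count m : Nat) : Int)
          = f m * ((L.count m : Nat) : Int) + (if m = a then f m else 0) := by
        intro m _
        rcases eq_or_ne m a with h | h
        · subst h
          rw [if_pos rfl, List.count_cons_self]
          push_cast; ring
        · rw [if_neg h]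
          have hc : List.count m (a :: L) = List.count m L := by
            simp [List.count_cons, h, Ne.symm h]
          rw [hc]; ring
      rw [List.map_congr_left hsplit, PySem.List.sum_map_add_int,
          pv_sum_single M f a hnd (hsub a (by simp))]
      ring

-- Fubini for list double sums
theorem pv_sum_swap (L1 : List Int) : ∀ (L2 : List Int) (g : Int → Int → Int),
    (L1.map (fun d => (L2.map (g d)).sum)).sum
      = (L2.map (fun m => (L1.map (fun d => g d m)).sum)).sum := by
  induction L1 with
  | nil => intro L2 g; simp
  | cons a L1 ih =>
      intro L2 g
      simp only [List.map_cons, List.sum_cons]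
      rw [ih L2 g, ← PySem.List.sum_map_add_int]

-- elementwise-congruent sums have equal remainders
theorem pv_sum_modeq (L : List Int) (f g : Int → Int)
    (h : ∀ x ∈ L, f x % 998244353 = g x % 998244353) :
    (L.map f).sum % 998244353 = (L.map g).sum % 998244353 := by
  induction L with
  | nil => rfl
  | cons a L ih =>
      simp only [List.map_cons, List.sum_cons]
      exact Int.ModEq.add (h a (by simp)) (ih (fun x hx => h x (by simp [hx])))

-- ---- B-side: the closed-form sum equals the weighted divisor-pair double loop ----

-- the running-sum recurrence: pvS n i = 2 * pvS n (i-1) + (pvD n i - 1)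
theorem pv_S_rec (n i : Int) (hi : 1 ≤ i) :
    pvS n i = 2 * pvS n (i - 1) + (pvD n i - 1) := by
  unfold pvS
  rw [PySem.List.pyRange_one_append 1 i (i + 1) (by omega) (by omega),
      PySem.List.pyRange_one_cons (show i < i + 1 by omega),
      PySem.List.pyRange_one_eq_nil (show i + 1 ≤ i + 1 by omega)]
  rw [show i - 1 + 1 = i by ring]
  rw [List.map_append, List.sum_append]
  simp only [List.map_cons, List.map_nil, List.sum_cons, List.sum_nil]
  have hmap : (PySem.List.pyRange 1 i 1).map (fun m => 2 ^ (i - m).toNat * (pvD n m - 1))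
      = (PySem.List.pyRange 1 i 1).map (fun m => 2 * (2 ^ (i - 1 - m).toNat * (pvD n m - 1))) := by
    apply List.map_congr_left
    intro m hm
    rw [PySem.List.mem_pyRange_one] at hm
    rw [show (i - m).toNat = (i - 1 - m).toNat + 1 by omega, pow_succ]
    ring
  rw [hmap]
  have hsum2 : ((PySem.List.pyRange 1 i 1).map
      (fun m => 2 * (2 ^ (i - 1 - m).toNat * (pvD n m - 1)))).sum
      = 2 * ((PySem.List.pyRange 1 i 1).map
          (fun m => 2 ^ (i - 1 - m).toNat * (pvD n m - 1))).sum := by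
    induction (PySem.List.pyRange 1 i 1) with
    | nil => simp
    | cons a L ihL => simp only [List.map_cons, List.sum_cons, ihL]; ring
  rw [hsum2]
  rw [show (i - i).toNat = 0 by omega, show i.toNat = (i - 1).toNat + 1 by omega, pow_succ]
  ring

-- A's reduced scalar DP computes the closed form pvS n (n-1) + pvD n n - 1, mod 998244353
theorem pv_scalar_closed (n : Int) (hn : 1 ≤ n) :
    ∀ (k : Nat) (a dp s : Int), 1 ≤ a → a + k = n + 1 →
    s = pvS n (a - 1) % 998244353 →
    (k = 0 → dp = (pvS n (a - 2) + pvD n (a - 1) - 1) % 998244353) →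
    ((PySem.List.pyRange a (n + 1) 1).foldl (fun (st : Int × Int) i =>
        let d := PySem.Int.mod (st.2 + pvD n i - 1) 998244353
        (d, PySem.Int.mod (st.2 + d) 998244353)) (dp, s)).1
      = (pvS n (n - 1) + pvD n n - 1) % 998244353 := by
  intro k
  induction k with
  | zero =>
      intro a dp s h1 hk hs hdp
      rw [PySem.List.pyRange_one_eq_nil (by omega)]
      simp only [List.foldl_nil]
      rw [hdp rfl, show a - 2 = n - 1 by omega, show a - 1 = n by omega]
  | succ k ih =>
      intro a dp s h1 hk hs hdp
      rw [PySem.List.pyRange_one_cons (by omega)]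
      simp only [List.foldl_cons]
      have hmod : ∀ x : Int, PySem.Int.mod x 998244353 = x % 998244353 :=
        fun x => PySem.Int.mod_eq_emod_of_pos (by norm_num)
      have hd : PySem.Int.mod (s + pvD n a - 1) 998244353
          = (pvS n (a - 1) + pvD n a - 1) % 998244353 := by
        rw [hmod, hs, Int.sub_emod, Int.add_emod, Int.emod_emod_of_dvd _ dvd_rfl,
            ← Int.add_emod, ← Int.sub_emod]
      have hsnew : PySem.Int.mod (s + PySem.Int.mod (s + pvD n a - 1) 998244353) 998244353
          = pvS n a % 998244353 := by
        rw [hmod, hd, hs]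
        rw [Int.add_emod, Int.emod_emod_of_dvd _ dvd_rfl, Int.emod_emod_of_dvd _ dvd_rfl,
            ← Int.add_emod]
        rw [show pvS n (a - 1) + (pvS n (a - 1) + pvD n a - 1)
            = 2 * pvS n (a - 1) + (pvD n a - 1) by ring]
        rw [← pv_S_rec n a h1]
      exact ih (a + 1) _ _ (by omega) (by omega)
        (by rw [hsnew, show a + 1 - 1 = a by ring])
        (fun _ => by rw [hd, show a + 1 - 2 = a - 1 by ring, show a + 1 - 1 = a by ring])

-- pulling a constant factor out of a list sum
theorem pv_sum_mul_left (c : Int) (L : List Int) (f : Int → Int) :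
    (L.map (fun x => c * f x)).sum = c * (L.map f).sum := by
  induction L with
  | nil => simp
  | cons a L ih => simp only [List.map_cons, List.sum_cons, ih]; ring

-- (a % M * c) % M = (a * c) % M
theorem pv_mul_emod_left (a c : Int) :
    (a % 998244353 * c) % 998244353 = (a * c) % 998244353 := by
  rw [Int.mul_emod, Int.emod_emod_of_dvd _ dvd_rfl, ← Int.mul_emod]

-- the Array append loop computes (via toList) the List append loop
theorem pv_pow2_arr (t : List Int) : ∀ (pw : Array Int), pw.toList ≠ [] →
    (t.foldl (fun pw _ =>
        pw.push (PySem.Int.mod (pw.getD (pw.size - 1) 0 * 2) 998244353)) pw).toList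
      = t.foldl (fun l _ =>
          l ++ [PySem.Int.mod (PySem.List.pyGetD l (-1) 0 * 2) 998244353]) pw.toList := by
  induction t with
  | nil => intro pw _; rfl
  | cons x t ih =>
      intro pw hne
      simp only [List.foldl_cons]
      have hsz : 1 ≤ pw.size := by
        rw [← Array.length_toList]
        cases h : pw.toList with
        | nil => exact absurd h hne
        | cons a l => simp
      have hlast : pw.getD (pw.size - 1) 0 = PySem.List.pyGetD pw.toList (-1) 0 := by
        have h1 := pv_arrGetD pw ((pw.size : Int) - 1) (by omega) (by omega)
        have h2 : ((pw.size : Int) - 1).toNat = pw.size - 1 := by omega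
        rw [h2] at h1
        rw [h1, PySem.List.pyGetD_neg_one _ _ hne,
            PySem.List.pyGetD_eq_getElem _ _ (by omega)
              (by rw [Array.length_toList]; omega),
            List.getLast_eq_getElem]
        have h3 : ((pw.size : Int) - 1).toNat = pw.toList.length - 1 := by
          rw [Array.length_toList]; omega
        simp only [h3]
      have hstep : (pw.push (PySem.Int.mod (pw.getD (pw.size - 1) 0 * 2) 998244353)).toList
          = pw.toList ++ [PySem.Int.mod (PySem.List.pyGetD pw.toList (-1) 0 * 2) 998244353] := by
        rw [Array.toList_push, hlast]
      rw [ih _ (by rw [hstep]; simp), hstep]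

-- B's power table after the append loop is 2^0 .. 2^(n-1), each reduced mod 998244353
theorem pv_pow2_eq (n : Int) (hn : 1 ≤ n) :
    ((PySem.List.pyRange 1 n 1).foldl (fun pw _ =>
        pw.push (PySem.Int.mod (pw.getD (pw.size - 1) 0 * 2) 998244353)) #[1]).toList
      = (List.range n.toNat).map pvPw := by
  rw [pv_pow2_arr _ #[1] (by decide)]
  have h1 : (#[1] : Array Int).toList = (List.range 1).map pvPw := by decide
  have hlen : 1 + (n - 1).toNat = n.toNat := by omega
  rw [h1, pv_pow2_build _ 1 (le_refl 1), PySem.List.length_pyRange_one, hlen]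

-- reading the power table at a nonnegative index below n
theorem pv_pw_getD (n j : Int) (h0 : 0 ≤ j) (hj : j < n) :
    PySem.List.pyGetD ((List.range n.toNat).map pvPw) j 0 = pvPw j.toNat := by
  rw [PySem.List.pyGetD_eq_getElem _ _ h0
      (by simp only [List.length_map, List.length_range]; omega)]
  simp only [List.getElem_map, List.getElem_range]

-- the indicator 'd divides m with 2d ≤ m ≤ n' summed over d in 1..n//2 counts the
-- proper divisors of m, i.e. pvD n m - 1
theorem pv_outer_indicator (n m : Int) (hn : 1 ≤ n) (hm1 : 1 ≤ m) (hm2 : m ≤ n) :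
    ((PySem.List.pyRange 1 (n / 2 + 1) 1).map
        (fun d => if d ∣ m ∧ 2 * d ≤ m ∧ m ≤ n then (1 : Int) else 0)).sum
      = pvD n m - 1 := by
  have hsplit : PySem.List.pyRange 1 (n + 1) 1
      = PySem.List.pyRange 1 (n / 2 + 1) 1 ++ PySem.List.pyRange (n / 2 + 1) (n + 1) 1 :=
    PySem.List.pyRange_one_append 1 (n / 2 + 1) (n + 1) (by omega) (by omega)
  have htail : ((PySem.List.pyRange (n / 2 + 1) (n + 1) 1).map
      (fun d => if d ∣ m ∧ 2 * d ≤ m ∧ m ≤ n then (1 : Int) else 0)).sum = 0 := by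
    have hz : ∀ d ∈ PySem.List.pyRange (n / 2 + 1) (n + 1) 1,
        (if d ∣ m ∧ 2 * d ≤ m ∧ m ≤ n then (1 : Int) else 0) = 0 := by
      intro d hd
      rw [PySem.List.mem_pyRange_one] at hd
      rw [if_neg]
      rintro ⟨-, h2, -⟩
      omega
    rw [List.map_congr_left hz]
    simp
  have hfull : ((PySem.List.pyRange 1 (n + 1) 1).map
      (fun d => if d ∣ m ∧ 2 * d ≤ m ∧ m ≤ n then (1 : Int) else 0)).sum
      = ((PySem.List.pyRange 1 (n / 2 + 1) 1).map
          (fun d => if d ∣ m ∧ 2 * d ≤ m ∧ m ≤ n then (1 : Int) else 0)).sum := by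
    rw [hsplit, List.map_append, List.sum_append, htail]
    ring
  rw [← hfull, pv_sum_indicator _ (fun d => d ∣ m ∧ 2 * d ≤ m ∧ m ≤ n)]
  have hcongr : (PySem.List.pyRange 1 (n + 1) 1).countP
        (fun d => decide (d ∣ m ∧ 2 * d ≤ m ∧ m ≤ n))
      = (PySem.List.pyRange 1 (n + 1) 1).countP
          (fun d => decide (d ∣ m ∧ d * 2 ≤ m ∧ m ≤ n)) := by
    apply List.countP_congr
    intro d _
    simp only [decide_eq_true_eq]
    constructor
    · rintro ⟨h1, h2, h3⟩; exact ⟨h1, by omega, h3⟩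
    · rintro ⟨h1, h2, h3⟩; exact ⟨h1, by omega, h3⟩
  rw [hcongr]
  have := pv_cover n m hm1 hm2
  omega

-- B's double loop over the power table computes the closed form, mod 998244353
theorem pv_B_body (n : Int) (pw2 : Array Int) (hn : 1 ≤ n)
    (hpw : pw2.toList = (List.range n.toNat).map pvPw) :
    PySem.Int.mod
      ((PySem.List.pyRange 1 (PySem.Int.floordiv n 2 + 1) 1).foldl (fun ans d =>
          (PySem.List.pyRange (2 * d) (n + 1) d).foldl (fun ans m =>
            ans + (if m < n then pw2.getD (n - 1 - m).toNat 0 else 1)) ans)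
        (pw2.getD (n - 1).toNat 0)) 998244353
      = (pvS n (n - 1) + pvD n n - 1) % 998244353 := by
  have hsize : (pw2.size : Int) = n := by
    rw [← Array.length_toList, hpw]
    simp only [List.length_map, List.length_range]
    omega
  have hread : ∀ j : Int, 0 ≤ j → j < n → pw2.getD j.toNat 0 = pvPw j.toNat := by
    intro j h0 hj
    rw [pv_arrGetD pw2 j h0 (by omega), hpw]
    exact pv_pw_getD n j h0 hj
  set w : Int → Int :=
    (fun m => if m < n then pw2.getD (n - 1 - m).toNat 0 else 1) with hw
  show PySem.Int.mod
      ((PySem.List.pyRange 1 (PySem.Int.floordiv n 2 + 1) 1).foldl (fun ans d =>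
          (PySem.List.pyRange (2 * d) (n + 1) d).foldl (fun ans m => ans + w m) ans)
        (pw2.getD (n - 1).toNat 0)) 998244353
      = (pvS n (n - 1) + pvD n n - 1) % 998244353
  -- the double loop is the double sum
  have hinner : ∀ (d ans : Int),
      (PySem.List.pyRange (2 * d) (n + 1) d).foldl (fun ans m => ans + w m) ans
        = ans + ((PySem.List.pyRange (2 * d) (n + 1) d).map w).sum :=
    fun d ans => PySem.List.foldl_add _ w ans
  have houter :
      (PySem.List.pyRange 1 (PySem.Int.floordiv n 2 + 1) 1).foldl (fun ans d =>
          (PySem.List.pyRange (2 * d) (n + 1) d).foldl (fun ans m => ans + w m) ans)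
        (pw2.getD (n - 1).toNat 0)
      = pw2.getD (n - 1).toNat 0
        + ((PySem.List.pyRange 1 (PySem.Int.floordiv n 2 + 1) 1).map
            (fun d => ((PySem.List.pyRange (2 * d) (n + 1) d).map w).sum)).sum := by
    rw [show (fun ans d =>
        (PySem.List.pyRange (2 * d) (n + 1) d).foldl (fun ans m => ans + w m) ans)
        = (fun (ans : Int) d =>
            ans + ((PySem.List.pyRange (2 * d) (n + 1) d).map w).sum) from
      funext fun ans => funext fun d => hinner d ans]
    exact PySem.List.foldl_add _ _ _
  rw [houter]
  rw [PySem.Int.floordiv_eq_ediv_of_pos (by norm_num)]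
  -- rewrite each inner sum as a count-weighted sum over 1..n
  have hG : ∀ d ∈ PySem.List.pyRange 1 (n / 2 + 1) 1,
      ((PySem.List.pyRange (2 * d) (n + 1) d).map w).sum
        = ((PySem.List.pyRange 1 (n + 1) 1).map
            (fun m => w m * (if d ∣ m ∧ 2 * d ≤ m ∧ m ≤ n then (1 : Int) else 0))).sum := by
    intro d hd
    rw [PySem.List.mem_pyRange_one] at hd
    rw [pv_sum_count _ (PySem.List.pyRange 1 (n + 1) 1) w
        (PySem.List.nodup_pyRange_one 1 (n + 1))
        (fun x hx => by
          rw [PySem.List.mem_pyRange_iff_of_pos (by omega)] at hx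
          rw [PySem.List.mem_pyRange_one]
          omega)]
    refine congrArg List.sum (List.map_congr_left ?_)
    intro m _
    rw [pv_count_pyRange_mult d (2 * d) m n (by omega)
        (dvd_mul_left d 2) (by omega)]
  rw [List.map_congr_left hG]
  -- swap the two sums and collapse the inner indicator sum to pvD n m - 1
  rw [pv_sum_swap]
  have hcollapse : ∀ m ∈ PySem.List.pyRange 1 (n + 1) 1,
      ((PySem.List.pyRange 1 (n / 2 + 1) 1).map
          (fun d => w m * (if d ∣ m ∧ 2 * d ≤ m ∧ m ≤ n then (1 : Int) else 0))).sum
        = w m * (pvD n m - 1) := by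
    intro m hm
    rw [PySem.List.mem_pyRange_one] at hm
    rw [pv_sum_mul_left (w m) _ (fun d => if d ∣ m ∧ 2 * d ≤ m ∧ m ≤ n then (1 : Int) else 0),
        pv_outer_indicator n m hn (by omega) (by omega)]
  rw [List.map_congr_left hcollapse]
  -- split off the m = n term and pass to the unreduced closed form mod 998244353
  rw [PySem.List.pyRange_one_append 1 n (n + 1) (by omega) (by omega),
      PySem.List.pyRange_one_cons (show n < n + 1 by omega),
      PySem.List.pyRange_one_eq_nil (le_refl (n + 1))]
  rw [List.map_append, List.sum_append]
  simp only [List.map_cons, List.map_nil, List.sum_cons, List.sum_nil]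
  have hwn : w n = 1 := by rw [hw]; simp
  have hP2top : pw2.getD (n - 1).toNat 0 = pvPw (n - 1).toNat :=
    hread (n - 1) (by omega) (by omega)
  rw [hwn, hP2top, PySem.Int.mod_eq_emod_of_pos (by norm_num)]
  -- congruence of the two sums term by term
  have hsum : ((PySem.List.pyRange 1 n 1).map (fun m => w m * (pvD n m - 1))).sum % 998244353
      = ((PySem.List.pyRange 1 n 1).map
          (fun m => 2 ^ (n - 1 - m).toNat * (pvD n m - 1))).sum % 998244353 := by
    apply pv_sum_modeq
    intro m hm
    rw [PySem.List.mem_pyRange_one] at hm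
    have hwm : w m = pvPw (n - 1 - m).toNat := by
      rw [hw]
      simp only [if_pos (show m < n by omega)]
      exact hread (n - 1 - m) (by omega) (by omega)
    rw [hwm]
    unfold pvPw
    exact pv_mul_emod_left _ _
  have htop : pvPw (n - 1).toNat % 998244353 = (2 : Int) ^ (n - 1).toNat % 998244353 := by
    unfold pvPw
    exact Int.emod_emod_of_dvd _ dvd_rfl
  have hfinal := Int.ModEq.add (Int.ModEq.add htop hsum) (Int.ModEq.refl (pvD n n - 1 + 0))
  unfold pvS
  rw [show n - 1 + 1 = n by ring]
  calc (pvPw (n - 1).toNat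
        + (((PySem.List.pyRange 1 n 1).map (fun m => w m * (pvD n m - 1))).sum
            + (1 * (pvD n n - 1) + 0))) % 998244353
      = (pvPw (n - 1).toNat
          + ((PySem.List.pyRange 1 n 1).map (fun m => w m * (pvD n m - 1))).sum
          + (pvD n n - 1 + 0)) % 998244353 := by ring_nf
    _ = ((2 : Int) ^ (n - 1).toNat
          + ((PySem.List.pyRange 1 n 1).map
              (fun m => 2 ^ (n - 1 - m).toNat * (pvD n m - 1))).sum
          + (pvD n n - 1 + 0)) % 998244353 := hfinal
    _ = (2 ^ (n - 1).toNat
          + ((PySem.List.pyRange 1 n 1).map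
              (fun m => 2 ^ (n - 1 - m).toNat * (pvD n m - 1))).sum
          + pvD n n - 1) % 998244353 := by ring_nf

-- B's port computes the closed form pvS n (n-1) + pvD n n - 1, mod 998244353
theorem pv_B_closed (n : Int) (hn : 1 ≤ n) :
    count_good_pairings_alt n = (pvS n (n - 1) + pvD n n - 1) % 998244353 := by
  unfold count_good_pairings_alt
  rw [if_neg (by omega)]
  exact pv_B_body n _ hn (pv_pow2_eq n hn)

-- ===== VERDICT (by name: the statement is the Claim_ definition above) =====
theorem count_good_pairings_spec : Claim_equal_count_good_pairings := by
  intro n _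
  unfold Spec_count_good_pairings
  by_cases hn : n < 1
  · unfold count_good_pairings count_good_pairings_alt
    rw [if_pos hn]
    rw [PySem.List.pyRange_one_eq_nil (by omega : n + 1 ≤ 1)]
    simp only [List.foldl_nil]
    decide
  · push_neg at hn
    unfold count_good_pairings
    have hLsize : ((Array.replicate (n + 1).toNat (1:Int)).size : Int) = n + 1 := by
      simp only [Array.size_replicate]; omega
    have hsieve := pv_arr_sieve n (PySem.List.pyRange 1 (n + 1) 1)
      (Array.replicate (n + 1).toNat 1)
      (fun x hx => (PySem.List.mem_pyRange_one.mp hx).1) (by omega)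
    rw [Array.toList_replicate] at hsieve
    set lA : Array Int := (PySem.List.pyRange 1 (n + 1) 1).foldl (fun l i =>
      (PySem.List.pyRange (i * 2) (n + 1) i).foldl (fun (l : Array Int) j =>
        l.set! j.toNat (l.getD j.toNat 0 + 1)) l) (Array.replicate (n + 1).toNat 1) with hlA
    have hlAsize : n + 1 ≤ (lA.size : Int) := by
      rw [← Array.length_toList, hsieve, pv_sieve_length]
      simp only [List.length_replicate]; omega
    have hl : ∀ i : Int, 1 ≤ i → i ≤ n → PySem.List.pyGetD lA.toList i 0 = pvD n i := by
      intro i h1 h2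
      rw [hsieve]
      rw [pv_sieve_getD n _ _ i (fun x hx => (PySem.List.mem_pyRange_one.mp hx).1)
          (by simp only [List.length_replicate]; omega) (by omega)
          (by simp only [List.length_replicate]; omega)]
      have hrep : PySem.List.pyGetD (List.replicate (n + 1).toNat (1:Int)) i 0 = 1 := by
        rw [PySem.List.pyGetD_eq_getElem _ _ (by omega) (by simp only [List.length_replicate]; omega)]
        simp
      rw [hrep]
      rw [List.map_congr_left (fun x hx => by
        exact pv_count_pyRange_mult x (x * 2) i n (PySem.List.mem_pyRange_one.mp hx).1
          (dvd_mul_right x 2) (by have := (PySem.List.mem_pyRange_one.mp hx).1; omega))]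
      rw [pv_sum_indicator _ (fun x => x ∣ i ∧ x * 2 ≤ i ∧ i ≤ n)]
      exact pv_cover n i h1 h2
    have harr := pv_arr_dp n lA hlAsize n.toNat 1 #[1] 1 (le_refl 1) (by omega) (by simp)
    have hlist := pv_dp_loop n lA.toList hl n.toNat 1 [1] 1 1 1 (le_refl 1) (by omega)
      (by simp) (by simp) (by simp) (by decide)
    have hclosed := pv_scalar_closed n hn n.toNat 1 1 1 (le_refl 1) (by omega)
      (by
        unfold pvS
        rw [show (1 : Int) - 1 + 1 = 1 by ring,
            PySem.List.pyRange_one_eq_nil (le_refl (1 : Int))]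
        norm_num)
      (fun h => absurd h (by omega))
    show PySem.List.pyGetD _ (-1) 0 = _
    rw [harr, hlist, hclosed, pv_B_closed n hn]
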